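-- pv_equiv track=rewrite | github.com/seannnnnn1017/openclaw-lite | agent/main.py | _resolve_task_identifier
-- ===== SOURCE A (Python) =====
-- def _normalize_task_name(value: str) -> str:
--     normalized = str(value or "").strip().replace("\\", "/")
--     while "//" in normalized:
--         normalized = normalized.replace("//", "/")
--     return normalized.strip("/")
--
-- def _resolve_task_identifier(tasks: list[dict], identifier: str) -> dict | None:
--     cleaned = str(identifier or "").strip()
--     if not cleaned:
--         return None
--
--     upper_identifier = cleaned.upper()
--     normalized_identifier = _normalize_task_name(cleaned)
--
--     for task in tasks:
--         if str(task.get("id", "")).upper() == upper_identifier: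
--             return task
--
--     for task in tasks:
--         if _normalize_task_name(task.get("task_name", "")) == normalized_identifier:
--             return task
--
--     short_name_matches = [
--         task
--         for task in tasks
--         if _normalize_task_name(task.get("short_name", "")) == normalized_identifier
--     ]
--     if len(short_name_matches) == 1:
--         return short_name_matches[0]
--
--     return None
-- ===== SOURCE B (Python) =====
-- def _normalize_task_name(value: str) -> str:
--     normalized = str(value or "").strip().replace("\\", "/")
--     while "//" in normalized:
--         normalized = normalized.replace("//", "/")
--     return normalized.strip("/")
--
-- def _resolve_task_identifier(tasks, identifier):
--     cleaned = str(identifier or "").strip()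
--     if not cleaned:
--         return None
--
--     upper_identifier = cleaned.upper()
--     normalized_identifier = _normalize_task_name(cleaned)
--
--     id_hits, name_hits, short_hits = [], [], []
--     for task in tasks:
--         if str(task.get("id", "")).upper() == upper_identifier:
--             id_hits.append(task)
--         if _normalize_task_name(task.get("task_name", "")) == normalized_identifier:
--             name_hits.append(task)
--         if _normalize_task_name(task.get("short_name", "")) == normalized_identifier:
--             short_hits.append(task)
--
--     if id_hits:
--         return id_hits[0]
--     if name_hits:
--         return name_hits[0]
--     if len(short_hits) == 1:
--         return short_hits[0]
--     return None
-- ===== Notes on version B (the rewrite author's own statement) =====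
-- stated objective: alternative
-- what changed: Replaces A's three separate traversals (two early-return scans plus a filtering comprehension) by one fused pass that classifies every task into three ordered candidate buckets, choosing the winner after the loop.
import Mathlib
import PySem

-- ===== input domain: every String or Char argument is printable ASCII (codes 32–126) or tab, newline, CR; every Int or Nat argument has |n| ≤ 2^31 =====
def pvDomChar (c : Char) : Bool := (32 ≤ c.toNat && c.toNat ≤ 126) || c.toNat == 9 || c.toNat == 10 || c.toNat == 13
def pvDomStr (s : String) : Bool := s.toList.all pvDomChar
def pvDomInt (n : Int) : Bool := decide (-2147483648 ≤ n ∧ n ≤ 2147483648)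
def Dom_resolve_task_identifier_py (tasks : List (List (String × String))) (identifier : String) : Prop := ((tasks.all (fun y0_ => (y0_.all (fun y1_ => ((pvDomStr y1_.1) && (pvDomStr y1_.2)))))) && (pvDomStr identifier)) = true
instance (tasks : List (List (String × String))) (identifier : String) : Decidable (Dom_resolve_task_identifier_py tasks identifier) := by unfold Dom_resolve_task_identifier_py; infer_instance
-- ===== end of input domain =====

-- B fuses A's three traversals (two early-return scans + a comprehension) into one pass
-- building three ordered candidate buckets; the winner is picked after the loop (objective: alternative).


-- ===== PORT A =====
-- shared helper (both Pythons define the identical _normalize_task_name).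
-- The 'while "//" in s' loop runs on fuel = len+1: each iteration strictly shortens the
-- string, so the fuel never runs out and the loop is exact.
def pvNormWhile : Nat → String → String
  | 0, s => s
  | n + 1, s =>
    if PySem.Str.isIn "//" s then pvNormWhile n (PySem.Str.replace s "//" "/") else s

def normalize_task_name (value : String) : String :=
  let normalized := PySem.Str.replace (PySem.Str.strip value) "\\" "/"
  PySem.Str.stripChars (pvNormWhile ((PySem.Str.len normalized).toNat + 1) normalized) "/"

-- task.get(key, "") : first-match lookup in the association list
def taskGet (task : List (String × String)) (key : String) : String :=
  (PySem.Dict.mk task).getD key ""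

-- 'for task in tasks: if p task: return task' — an early-return scan
def pvScan (p : List (String × String) → Bool) :
    List (List (String × String)) → Option (List (String × String))
  | [] => none
  | t :: rest => if p t then some t else pvScan p rest

def resolve_task_identifier_py (tasks : List (List (String × String))) (identifier : String) : Option (List (String × String)) :=
  let cleaned := PySem.Str.strip identifier
  if cleaned == "" then none
  else
    let upper_identifier := PySem.Str.upper cleaned
    let normalized_identifier := normalize_task_name cleaned
    match pvScan (fun t => PySem.Str.upper (taskGet t "id") == upper_identifier) tasks with
    | some t => some t
    | none =>
      match pvScan (fun t => normalize_task_name (taskGet t "task_name") == normalized_identifier) tasks with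
      | some t => some t
      | none =>
        let short_name_matches := tasks.filter (fun t => normalize_task_name (taskGet t "short_name") == normalized_identifier)
        if short_name_matches.length == 1 then short_name_matches.head? else none

-- ===== PORT B =====
def resolve_task_identifier_py_alt (tasks : List (List (String × String))) (identifier : String) : Option (List (String × String)) :=
  let cleaned := PySem.Str.strip identifier
  if cleaned == "" then none
  else
    let upper_identifier := PySem.Str.upper cleaned
    let normalized_identifier := normalize_task_name cleaned
    let buckets := tasks.foldl
      (fun (acc : List (List (String × String)) × List (List (String × String)) × List (List (String × String))) t =>
        let (id_hits, name_hits, short_hits) := acc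
        ((if PySem.Str.upper (taskGet t "id") == upper_identifier then id_hits ++ [t] else id_hits),
         (if normalize_task_name (taskGet t "task_name") == normalized_identifier then name_hits ++ [t] else name_hits),
         (if normalize_task_name (taskGet t "short_name") == normalized_identifier then short_hits ++ [t] else short_hits)))
      ([], [], [])
    if !buckets.1.isEmpty then buckets.1.head?
    else if !buckets.2.1.isEmpty then buckets.2.1.head?
    else if buckets.2.2.length == 1 then buckets.2.2.head?
    else none

-- ===== PRECONDITION & SPEC =====
def Spec_resolve_task_identifier_py (tasks : List (List (String × String))) (identifier : String) (out : Option (List (String × String))) : Prop := out = resolve_task_identifier_py_alt tasks identifier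
instance (tasks : List (List (String × String))) (identifier : String) (out : Option (List (String × String))) : Decidable (Spec_resolve_task_identifier_py tasks identifier out) := by unfold Spec_resolve_task_identifier_py; infer_instance

-- ===== CLAIM (what is proved, stated in full; the proofs are below) =====
def Claim_equal_resolve_task_identifier_py : Prop := ∀ (tasks : List (List (String × String))) (identifier : String), Dom_resolve_task_identifier_py tasks identifier → Spec_resolve_task_identifier_py tasks identifier (resolve_task_identifier_py tasks identifier)

-- ===== LEMMAS AND PROOFS =====

-- A's early-return scan finds the head of the filtered list
theorem pvScan_eq_head_filter (p : List (String × String) → Bool)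
    (l : List (List (String × String))) : pvScan p l = (l.filter p).head? := by
  induction l with
  | nil => rfl
  | cons t rest ih =>
    by_cases h : p t <;> simp [pvScan, List.filter, h, ih]

-- B's fused fold builds the three filtered lists (appended to the accumulators)
theorem foldl_buckets (p q r : List (String × String) → Bool)
    (l : List (List (String × String)))
    (a b c : List (List (String × String))) :
    l.foldl
      (fun (acc : List (List (String × String)) × List (List (String × String)) × List (List (String × String))) t =>
        let (bi, bn, bs) := acc
        ((if p t then bi ++ [t] else bi),
         (if q t then bn ++ [t] else bn),
         (if r t then bs ++ [t] else bs)))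
      (a, b, c)
    = (a ++ l.filter p, b ++ l.filter q, c ++ l.filter r) := by
  induction l generalizing a b c with
  | nil => simp
  | cons t rest ih =>
    by_cases hp : p t <;> by_cases hq : q t <;> by_cases hr : r t <;>
      simp [List.foldl, List.filter, hp, hq, hr, ih]

-- ===== VERDICT (by name: the statement is the Claim_ definition above) =====
theorem resolve_task_identifier_py_spec : Claim_equal_resolve_task_identifier_py := by
  intro tasks identifier _
  unfold Spec_resolve_task_identifier_py resolve_task_identifier_py resolve_task_identifier_py_alt
  by_cases hc : PySem.Str.strip identifier == ""
  · simp [hc]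
  · simp only [hc, if_false, Bool.false_eq_true]
    rw [foldl_buckets, pvScan_eq_head_filter, pvScan_eq_head_filter]
    simp only [List.nil_append]
    cases hid : (tasks.filter (fun t => PySem.Str.upper (taskGet t "id") == PySem.Str.upper (PySem.Str.strip identifier))) with
    | cons x xs => simp
    | nil =>
      simp only [List.head?_nil, List.isEmpty_nil]
      cases hname : (tasks.filter (fun t => normalize_task_name (taskGet t "task_name") == normalize_task_name (PySem.Str.strip identifier))) with
      | cons y ys => simp
      | nil => simp
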